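-- pv_equiv track=rewrite | github.com/zhshinichi/cverebuild | src/toolbox/helper.py | remove_tree_from_setup_logs
-- ===== SOURCE A (Python) =====
-- def remove_tree_from_setup_logs(logs: str) -> str:
--     lines = logs.splitlines()
--     keep = []
--     skip = False
--     for line in lines:
--         if "## DIRECTORY TREE" in line:
--             skip = True
--             continue
--         if "## IMPORTANT FILES" in line:
--             skip = False
--         if not skip:
--             keep.append(line)
--     return "\n".join(keep)
-- ===== SOURCE B (Python) =====
-- def remove_tree_from_setup_logs(logs: str) -> str:
--     it = iter(logs.splitlines())
--     keep = []
--     for line in it: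
--         if "## DIRECTORY TREE" in line:
--             for inner in it:
--                 if "## DIRECTORY TREE" in inner:
--                     continue
--                 if "## IMPORTANT FILES" in inner:
--                     keep.append(inner)
--                     break
--         else:
--             keep.append(line)
--     return "\n".join(keep)
-- ===== Notes on version B (the rewrite author's own statement) =====
-- stated objective: alternative
-- what changed: Replaces the boolean skip-flag state machine with a shared-iterator two-loop decomposition: a nested inner loop swallows the directory-tree section and breaks on the IMPORTANT FILES marker, so no mode flag is threaded through the scan.
import Mathlib
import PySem

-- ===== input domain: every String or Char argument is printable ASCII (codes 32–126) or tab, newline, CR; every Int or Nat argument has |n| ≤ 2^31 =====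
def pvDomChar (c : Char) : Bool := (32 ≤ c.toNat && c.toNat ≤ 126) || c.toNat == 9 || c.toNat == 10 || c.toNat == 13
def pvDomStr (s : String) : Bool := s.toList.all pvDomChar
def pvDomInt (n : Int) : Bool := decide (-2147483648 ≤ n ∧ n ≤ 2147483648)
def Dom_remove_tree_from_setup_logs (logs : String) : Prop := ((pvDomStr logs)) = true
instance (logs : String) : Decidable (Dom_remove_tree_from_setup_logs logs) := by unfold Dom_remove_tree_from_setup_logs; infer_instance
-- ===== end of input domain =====

-- B replaces A's boolean skip-flag state machine by a shared-iterator two-loop decomposition (alternative, same cost).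

-- ===== PORT A =====
-- A's single loop over splitlines with the `keep` accumulator and `skip` flag.
def pvALoop : List String → List String → Bool → List String
  | [], keep, _ => keep
  | line :: rest, keep, skip =>
    if PySem.Str.isIn "## DIRECTORY TREE" line then
      pvALoop rest keep true
    else
      let skip' := if PySem.Str.isIn "## IMPORTANT FILES" line then false else skip
      pvALoop rest (if !skip' then keep ++ [line] else keep) skip'

def remove_tree_from_setup_logs (logs : String) : String :=
  PySem.Str.join "\n" (pvALoop (PySem.Str.splitlines logs) [] false)

-- ===== PORT B =====
-- B's outer loop / inner swallowing loop over the shared iterator (remaining lines).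
mutual
def pvBOuter : List String → List String
  | [] => []
  | line :: rest =>
    if PySem.Str.isIn "## DIRECTORY TREE" line then pvBInner rest
    else line :: pvBOuter rest

def pvBInner : List String → List String
  | [] => []
  | line :: rest =>
    if PySem.Str.isIn "## DIRECTORY TREE" line then pvBInner rest
    else if PySem.Str.isIn "## IMPORTANT FILES" line then line :: pvBOuter rest
    else pvBInner rest
end

def remove_tree_from_setup_logs_alt (logs : String) : String :=
  PySem.Str.join "\n" (pvBOuter (PySem.Str.splitlines logs))

-- ===== PRECONDITION & SPEC =====
def Spec_remove_tree_from_setup_logs (logs : String) (out : String) : Prop := out = remove_tree_from_setup_logs_alt logs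
instance (logs : String) (out : String) : Decidable (Spec_remove_tree_from_setup_logs logs out) := by unfold Spec_remove_tree_from_setup_logs; infer_instance

-- ===== CLAIM (what is proved, stated in full; the proofs are below) =====
def Claim_equal_remove_tree_from_setup_logs : Prop := ∀ (logs : String), Dom_remove_tree_from_setup_logs logs → Spec_remove_tree_from_setup_logs logs (remove_tree_from_setup_logs logs)

-- ===== LEMMAS AND PROOFS =====
-- A's loop state (keep, skip) corresponds to: lines kept so far, and whether B is in the inner (swallowing) loop.
theorem pvALoop_eq (lines : List String) :
    ∀ (keep : List String) (skip : Bool),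
      pvALoop lines keep skip = keep ++ (if skip then pvBInner lines else pvBOuter lines) := by
  induction lines with
  | nil => intro keep skip; cases skip <;> simp [pvALoop, pvBInner, pvBOuter]
  | cons line rest ih =>
    intro keep skip
    by_cases hd : PySem.Str.isIn "## DIRECTORY TREE" line = true
    · cases skip <;>
        simp only [pvALoop, pvBInner, pvBOuter, hd, if_true, ih, Bool.false_eq_true, if_false]
    · by_cases hi : PySem.Str.isIn "## IMPORTANT FILES" line = true
      · cases skip <;>
          simp only [pvALoop, pvBInner, pvBOuter, hd, hi, if_true, if_false, ih, Bool.not_false,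
            Bool.false_eq_true, List.append_assoc, List.singleton_append]
      · cases skip <;>
          simp only [pvALoop, pvBInner, pvBOuter, hd, hi, if_true, if_false, ih, Bool.not_true,
            Bool.not_false, Bool.false_eq_true, List.append_assoc, List.singleton_append]

-- ===== VERDICT (by name: the statement is the Claim_ definition above) =====
theorem remove_tree_from_setup_logs_spec : Claim_equal_remove_tree_from_setup_logs := by
  intro logs _
  unfold Spec_remove_tree_from_setup_logs remove_tree_from_setup_logs remove_tree_from_setup_logs_alt
  rw [pvALoop_eq]
  simp
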